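-- pv_equiv track=rewrite | github.com/MarcoGlauser/pokemap | pokeworld/tasks.py | generate_swirl_degrees
-- ===== SOURCE A (Python) =====
-- def generate_swirl_degrees(steps):
--     squares = []
--     degrees = [0, ]
--     current_step = 0
--     counter = 1
--     degreeshift = 90
--     current_degree = 0
--     for i in range(1, steps + 1):
--         squares.append(i * i - 1)
--     for i in range(2, squares[-1] + 1):
--         if i in squares:
--             counter += 1
--             if current_step != 0:
--                 current_step += 1
--         if current_step <= 0:
--             current_degree += degreeshift
--             current_step = counter
--         degrees.append(current_degree)
--         current_step -= 1
--
--     return degrees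
-- ===== SOURCE B (Python) =====
-- def generate_swirl_degrees(steps):
--     # Spiral run-length emission: segment k holds degree 90*k and spans
--     # k//2 + 1 entries; emit segments directly, truncated to the total
--     # length max(1, steps*steps - 1).
--     total = max(1, steps * steps - 1)
--     degrees = []
--     degree = 0
--     run = 1
--     runs_done = 0
--     while len(degrees) < total:
--         take = min(run, total - len(degrees))
--         degrees += [degree] * take
--         degree += 90
--         runs_done += 1
--         if runs_done % 2 == 0:
--             run += 1
--     return degrees
-- ===== Notes on version B (the rewrite author's own statement) =====
-- stated objective: faster
-- what changed: Replaced the per-index counter/countdown loop with a linear membership scan of the squares list by direct run-length emission of the spiral segments (degree 90*k repeated k//2+1 times, truncated to total length max(1, steps^2-1)).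
import Mathlib
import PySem

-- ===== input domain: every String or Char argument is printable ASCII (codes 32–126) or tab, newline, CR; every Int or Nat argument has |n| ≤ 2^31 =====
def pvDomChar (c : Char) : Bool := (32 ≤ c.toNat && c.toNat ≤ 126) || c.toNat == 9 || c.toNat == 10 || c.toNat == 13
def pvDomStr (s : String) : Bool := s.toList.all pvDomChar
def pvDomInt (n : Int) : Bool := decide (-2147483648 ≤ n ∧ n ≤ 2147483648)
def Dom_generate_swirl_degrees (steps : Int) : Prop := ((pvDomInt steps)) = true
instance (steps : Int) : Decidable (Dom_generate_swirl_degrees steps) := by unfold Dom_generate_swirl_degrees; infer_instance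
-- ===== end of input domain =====

-- B replaces A's per-index counter/countdown loop (with a linear membership scan of the
-- squares list on every index) by direct emission of the spiral's run-length segments,
-- an asymptotically faster algorithm producing the identical list.

-- ===== PORT A =====
-- one iteration of A's inner 'for i in range(2, squares[-1] + 1)' loop;
-- state = (degrees, current_step, counter, current_degree)
def swirlBody (squares : List Int) : (List Int × Int × Int × Int) → Int → (List Int × Int × Int × Int)
  | (degrees, current_step, counter, current_degree), i =>
    let (counter', step1) :=
      if squares.contains i then
        (counter + 1, if current_step ≠ 0 then current_step + 1 else current_step)
      else (counter, current_step)
    let (current_degree', step2) :=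
      if step1 ≤ 0 then (current_degree + 90, counter') else (current_degree, step1)
    (degrees ++ [current_degree'], step2 - 1, counter', current_degree')

def generate_swirl_degrees (steps : Int) : List Int :=
  let squares := (PySem.List.pyRange 1 (steps + 1)).foldl (fun acc i => acc ++ [i * i - 1]) []
  match PySem.List.pyGet? squares (-1) with
  | none => []  -- Python raises IndexError here (steps ≤ 0); excluded by Pre_
  | some last =>
      ((PySem.List.pyRange 2 (last + 1)).foldl (swirlBody squares) ([0], 0, 1, 0)).1

-- ===== PORT B =====
-- Source B's while loop as recursion on the remaining count; Source B's `run` (always ≥ 1)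
-- is stored as r with run = r + 1 so the remaining count visibly decreases.
def swirlEmit : Nat → Nat → Int → Nat → List Int → List Int
  | 0, _, _, _, degrees => degrees
  | (rem + 1), r, degree, runs_done, degrees =>
      let take := min (r + 1) (rem + 1)
      swirlEmit (rem + 1 - take) (if (runs_done + 1) % 2 == 0 then r + 1 else r)
        (degree + 90) (runs_done + 1) (degrees ++ List.replicate take degree)
  termination_by rem _ _ _ _ => rem
  decreasing_by omega

def generate_swirl_degrees_alt (steps : Int) : List Int :=
  let total := max 1 (steps * steps - 1)
  swirlEmit total.toNat 0 0 0 []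

-- ===== PRECONDITION & SPEC =====
-- Pre_ excludes exactly steps ≤ 0, where A raises IndexError on squares[-1].
def Pre_generate_swirl_degrees (steps : Int) : Prop := 1 ≤ steps
instance (steps : Int) : Decidable (Pre_generate_swirl_degrees steps) := by
  unfold Pre_generate_swirl_degrees; infer_instance

def pvWitness_generate_swirl_degrees : Int := 3

def Spec_generate_swirl_degrees (steps : Int) (out : List Int) : Prop := out = generate_swirl_degrees_alt steps
instance (steps : Int) (out : List Int) : Decidable (Spec_generate_swirl_degrees steps out) := by unfold Spec_generate_swirl_degrees; infer_instance

-- ===== CLAIM (what is proved, stated in full; the proofs are below) =====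
def Claim_equal_generate_swirl_degrees : Prop := ∀ (steps : Int), Dom_generate_swirl_degrees steps → Pre_generate_swirl_degrees steps → Spec_generate_swirl_degrees steps (generate_swirl_degrees steps)

-- ===== LEMMAS AND PROOFS =====

-- the squares list A builds, in map form
def sqList (s : Int) : List Int := (PySem.List.pyRange 1 (s + 1)).map (fun i => i * i - 1)

-- the spiral after m full PAIRS of runs: runs 2j and 2j+1 both have length j+1 and
-- degrees 180j and 180j+90
def Q : Nat → List Int
  | 0 => []
  | (m + 1) => Q m ++ List.replicate (m + 1) (180 * (m : Int)) ++ List.replicate (m + 1) (180 * (m : Int) + 90)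

lemma pyGet?_append_singleton_neg_one (xs : List Int) (a : Int) :
    PySem.List.pyGet? (xs ++ [a]) (-1) = some a := by
  simp [PySem.List.pyGet?, PySem.List.pyIdx?]

-- ---- B-side lemmas ----

lemma emit_acc (n : Nat) : ∀ (r : Nat) (d : Int) (k : Nat) (acc : List Int),
    swirlEmit n r d k acc = acc ++ swirlEmit n r d k [] := by
  induction n using Nat.strong_induction_on with
  | _ n ih =>
    intro r d k acc
    match n with
    | 0 => simp [swirlEmit]
    | (m + 1) =>
      rw [swirlEmit, swirlEmit]
      have hlt : m + 1 - min (r + 1) (m + 1) < m + 1 := by omega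
      rw [ih _ hlt _ _ _ (acc ++ _), ih _ hlt _ _ _ ([] ++ _)]
      simp

lemma emit_run (n r : Nat) (d : Int) (k : Nat) (acc : List Int) (h : r + 1 ≤ n) :
    swirlEmit n r d k acc =
      swirlEmit (n - (r + 1)) (if (k + 1) % 2 == 0 then r + 1 else r) (d + 90) (k + 1)
        (acc ++ List.replicate (r + 1) d) := by
  obtain ⟨m, rfl⟩ : ∃ m, n = m + 1 := ⟨n - 1, by omega⟩
  rw [swirlEmit]
  have : min (r + 1) (m + 1) = r + 1 := by omega
  rw [this]

lemma emit_trunc (n r : Nat) (d : Int) (k : Nat) (acc : List Int) (h : n ≤ r) :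
    swirlEmit n r d k acc = acc ++ List.replicate n d := by
  match n with
  | 0 => simp [swirlEmit]
  | (m + 1) =>
    rw [swirlEmit]
    have hmin : min (r + 1) (m + 1) = m + 1 := by omega
    rw [hmin]
    simp [swirlEmit]

lemma emit_pairs (m : Nat) : ∀ (rem : Nat),
    swirlEmit (m * (m + 1) + rem) 0 0 0 [] =
      Q m ++ swirlEmit rem m (180 * (m : Int)) (2 * m) [] := by
  induction m with
  | zero => intro rem; simp [Q]
  | succ m ih =>
    intro rem
    have harith : (m + 1) * (m + 2) + rem = m * (m + 1) + (2 * m + 2 + rem) := by ring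
    rw [show (m + 1) * (m + 1 + 1) + rem = m * (m + 1) + (2 * m + 2 + rem) by ring]
    rw [ih (2 * m + 2 + rem)]
    rw [emit_run _ _ _ _ _ (by omega)]
    have hodd : ((2 * m + 1) % 2 == 0) = false := by simp
    rw [hodd]
    simp only [Bool.false_eq_true, if_false]
    rw [show 2 * m + 2 + rem - (m + 1) = m + 1 + rem by omega]
    rw [emit_run _ _ _ _ _ (by omega)]
    have heven : ((2 * m + 1 + 1) % 2 == 0) = true := by
      rw [show 2 * m + 1 + 1 = 2 * (m + 1) by ring]; simp [Nat.mul_mod_right]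
    rw [heven]
    simp only [if_true]
    rw [show m + 1 + rem - (m + 1) = rem by omega]
    rw [emit_acc]
    conv_rhs => rw [emit_acc]
    rw [show (2 * m + 1 + 1) = 2 * (m + 1) by ring]
    rw [show (180 : Int) * (m : Int) + 90 + 90 = 180 * ((m + 1 : Nat) : Int) by push_cast; ring]
    simp only [Q, List.nil_append, List.append_assoc]
  
-- closed form of B for steps = t + 2
lemma alt_closed (t : Nat) :
    generate_swirl_degrees_alt ((t : Int) + 2) =
      Q (t + 1) ++ List.replicate (t + 1) (180 * ((t : Int) + 1)) := by
  show swirlEmit (max 1 (((t : Int) + 2) * ((t : Int) + 2) - 1)).toNat 0 0 0 [] = _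
  have h1 : ((t : Int) + 2) * ((t : Int) + 2) - 1 = ((t * t + 4 * t + 3 : Nat) : Int) := by
    push_cast; ring
  rw [h1]
  have h2 : max 1 ((t * t + 4 * t + 3 : Nat) : Int) = ((t * t + 4 * t + 3 : Nat) : Int) := by
    apply max_eq_right; exact_mod_cast Nat.one_le_iff_ne_zero.mpr (by omega)
  rw [h2, Int.toNat_natCast]
  rw [show t * t + 4 * t + 3 = (t + 1) * (t + 1 + 1) + (t + 1) by ring]
  rw [emit_pairs]
  rw [emit_trunc _ _ _ _ _ (by omega)]
  push_cast
  simp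

-- ---- A-side lemmas ----

-- a single swirlBody step only inspects `squares` through `contains`
lemma swirlBody_congr (sq sq' : List Int) (st : List Int × Int × Int × Int) (i : Int)
    (h : sq.contains i = sq'.contains i) : swirlBody sq st i = swirlBody sq' st i := by
  obtain ⟨ds, cs, c, d⟩ := st
  simp only [swirlBody, h]

-- countdown: over a square-free range, with current_step = k ≥ n, each iteration
-- just appends the current degree and decrements the step
lemma countdown (squares : List Int) (n : Nat) : ∀ (lo k : Int) (ds : List Int) (c d : Int),
    (n : Int) ≤ k →
    (∀ i, lo ≤ i → i < lo + n → squares.contains i = false) →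
    (PySem.List.pyRange lo (lo + n)).foldl (swirlBody squares) (ds, k, c, d)
      = (ds ++ List.replicate n d, k - n, c, d) := by
  induction n with
  | zero => intro lo k ds c d _ _; simp
  | succ n ih =>
    intro lo k ds c d hk hsq
    push_cast at hk hsq ⊢
    rw [PySem.List.pyRange_one_cons (by omega)]
    rw [List.foldl_cons]
    have hc : squares.contains lo = false := hsq lo le_rfl (by omega)
    have hk1 : ¬ (k ≤ 0) := by omega
    simp only [swirlBody, hc, Bool.false_eq_true, if_false, if_neg hk1]
    rw [show lo + ((n : Int) + 1) = lo + 1 + (n : Int) by ring]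
    rw [ih (lo + 1) (k - 1) (ds ++ [d]) c d (by omega)
      (fun i h1 h2 => hsq i (by omega) (by omega))]
    simp only [Prod.mk.injEq, List.append_assoc, List.singleton_append, List.replicate_succ, and_true, true_and]
    omega

-- a full or partial run: from current_step = 0, the first iteration bumps the degree
-- and reloads the counter, then counts down
lemma runlem (squares : List Int) (n : Nat) (lo : Int) (ds : List Int) (c d : Int)
    (hn1 : 1 ≤ n) (hnc : (n : Int) ≤ c)
    (hsq : ∀ i, lo ≤ i → i < lo + n → squares.contains i = false) :
    (PySem.List.pyRange lo (lo + n)).foldl (swirlBody squares) (ds, 0, c, d)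
      = (ds ++ List.replicate n (d + 90), c - n, c, d + 90) := by
  obtain ⟨m, rfl⟩ : ∃ m, n = m + 1 := ⟨n - 1, by omega⟩
  push_cast at hnc hsq ⊢
  rw [PySem.List.pyRange_one_cons (by omega)]
  rw [List.foldl_cons]
  have hc : squares.contains lo = false := hsq lo le_rfl (by omega)
  simp only [swirlBody, hc, Bool.false_eq_true, if_false, if_pos (le_refl (0 : Int))]
  rw [show lo + ((m : Int) + 1) = lo + 1 + (m : Int) by ring]
  rw [countdown squares m (lo + 1) (c - 1) (ds ++ [d + 90]) c (d + 90) (by omega)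
    (fun i h1 h2 => hsq i (by omega) (by omega))]
  simp only [Prod.mk.injEq, List.append_assoc, List.singleton_append, List.replicate_succ, and_true, true_and]
  omega

-- squares membership facts
lemma sqList_succ (s : Int) (hs : 0 ≤ s) :
    sqList (s + 1) = sqList s ++ [(s + 1) * (s + 1) - 1] := by
  unfold sqList
  rw [PySem.List.pyRange_one_succ_right (by omega), List.map_append]
  simp

lemma sqList_contains_false (s i : Int) (h0 : 0 ≤ s) (hlo : s * s ≤ i) :
    (sqList s).contains i = false := by
  suffices h : i ∉ sqList s by simpa using h
  unfold sqList
  intro hmem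
  rw [List.mem_map] at hmem
  obtain ⟨j, hj, hji⟩ := hmem
  rw [PySem.List.mem_pyRange_one] at hj
  have hjs : j ≤ s := by omega
  have : j * j ≤ s * s := mul_le_mul hjs hjs (by omega) (by omega)
  omega

-- contains on the extended squares list, below its last element
lemma sqList_succ_contains_eq (s i : Int) (h0 : 0 ≤ s) (hne : i ≠ s * s + 2 * s) :
    (sqList (s + 1)).contains i = (sqList s).contains i := by
  rw [sqList_succ s h0]
  have h1 : (s + 1) * (s + 1) - 1 = s * s + 2 * s := by ring
  simp only [List.contains_append, h1]
  simp [hne]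

lemma sqList_succ_contains_false (s i : Int) (h0 : 0 ≤ s) (hlo : s * s ≤ i)
    (hhi : i < s * s + 2 * s) :
    (sqList (s + 1)).contains i = false := by
  rw [sqList_succ_contains_eq s i h0 (by omega)]
  exact sqList_contains_false s i h0 hlo

-- range-shape wrappers for countdown/runlem
lemma countdown' (squares : List Int) (n : Nat) (lo hi k : Int) (ds : List Int) (c d : Int)
    (hhi : hi = lo + (n : Int)) (hk : (n : Int) ≤ k)
    (hsq : ∀ i, lo ≤ i → i < hi → squares.contains i = false) :
    (PySem.List.pyRange lo hi).foldl (swirlBody squares) (ds, k, c, d)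
      = (ds ++ List.replicate n d, k - n, c, d) := by
  subst hhi; exact countdown squares n lo k ds c d hk hsq

lemma runlem' (squares : List Int) (n : Nat) (lo hi : Int) (ds : List Int) (c d : Int)
    (hhi : hi = lo + (n : Int)) (hn1 : 1 ≤ n) (hnc : (n : Int) ≤ c)
    (hsq : ∀ i, lo ≤ i → i < hi → squares.contains i = false) :
    (PySem.List.pyRange lo hi).foldl (swirlBody squares) (ds, 0, c, d)
      = (ds ++ List.replicate n (d + 90), c - n, c, d + 90) := by
  subst hhi; exact runlem squares n lo ds c d hn1 hnc hsq

lemma sqList_contains_true (s : Int) (h2 : 0 ≤ s) :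
    (sqList (s + 1)).contains (s * s + 2 * s) = true := by
  have : (s * s + 2 * s) ∈ sqList (s + 1) := by
    unfold sqList
    rw [List.mem_map]
    exact ⟨s + 1, by rw [PySem.List.mem_pyRange_one]; omega, by ring⟩
  simpa using this

lemma AInv (t : Nat) :
    (PySem.List.pyRange 2 (((t : Int) + 2) * ((t : Int) + 2))).foldl
        (swirlBody (sqList ((t : Int) + 2))) ([0], 0, 1, 0) =
      (Q (t + 1) ++ List.replicate (t + 1) (180 * ((t : Int) + 1)), 1, (t : Int) + 2,
        180 * ((t : Int) + 1)) := by
  induction t with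
  | zero => decide
  | succ t ih =>
    push_cast
    have h0 : (0 : Int) ≤ (t : Int) + 2 := by omega
    have hss : (4 : Int) ≤ ((t : Int) + 2) * ((t : Int) + 2) := by nlinarith [Int.natCast_nonneg t]
    -- abbreviations
    have hsq1 : ((t : Int) + 1 + 2) = ((t : Int) + 2) + 1 := by ring
    rw [hsq1]
    -- split the range at the old bound and at the run boundaries
    rw [PySem.List.pyRange_one_append 2 (((t : Int) + 2) * ((t : Int) + 2))
      ((((t : Int) + 2) + 1) * (((t : Int) + 2) + 1)) (by omega) (by nlinarith)]
    rw [List.foldl_append]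
    -- part 1: the old range, with the extended squares list, via congruence and ih
    have hpart1 : (PySem.List.pyRange 2 (((t : Int) + 2) * ((t : Int) + 2))).foldl
        (swirlBody (sqList (((t : Int) + 2) + 1))) ([0], 0, 1, 0)
        = (Q (t + 1) ++ List.replicate (t + 1) (180 * ((t : Int) + 1)), 1, (t : Int) + 2,
           180 * ((t : Int) + 1)) := by
      rw [PySem.List.foldl_congr_mem _ _ (swirlBody (sqList ((t : Int) + 2))) _
        (fun acc i hi => swirlBody_congr _ _ acc i (by
          rw [PySem.List.mem_pyRange_one] at hi
          exact sqList_succ_contains_eq ((t : Int) + 2) i h0 (by nlinarith)))]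
      exact ih
    rw [hpart1]
    -- parts 2..5 over [s*s, (s+1)*(s+1))
    have hnsq : ∀ i, ((t : Int) + 2) * ((t : Int) + 2) ≤ i →
        i < ((t : Int) + 2) * ((t : Int) + 2) + 2 * ((t : Int) + 2) →
        (sqList (((t : Int) + 2) + 1)).contains i = false := by
      intro i h1 h2
      exact sqList_succ_contains_false ((t : Int) + 2) i h0 h1 h2
    rw [PySem.List.pyRange_one_append (((t : Int) + 2) * ((t : Int) + 2))
      (((t : Int) + 2) * ((t : Int) + 2) + 1)
      ((((t : Int) + 2) + 1) * (((t : Int) + 2) + 1)) (by omega) (by nlinarith)]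
    rw [List.foldl_append]
    rw [countdown' _ 1 _ _ _ _ _ _ (by norm_num) (by norm_num)
      (fun i h1 h2 => hnsq i h1 (by omega))]
    norm_num
    rw [PySem.List.pyRange_one_append (((t : Int) + 2) * ((t : Int) + 2) + 1)
      (((t : Int) + 2) * ((t : Int) + 2) + 1 + ((t : Int) + 2))
      ((((t : Int) + 2) + 1) * (((t : Int) + 2) + 1)) (by omega) (by nlinarith)]
    rw [List.foldl_append]
    rw [runlem' _ (t + 2) _ _ _ _ _ (by push_cast; ring) (by omega) (by push_cast; omega)
      (fun i h1 h2 => hnsq i (by omega) (by omega))]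
    rw [show ((t : Int) + 2 - ((t + 2 : Nat) : Int)) = 0 by push_cast; ring]
    rw [PySem.List.pyRange_one_append (((t : Int) + 2) * ((t : Int) + 2) + 1 + ((t : Int) + 2))
      (((t : Int) + 2) * ((t : Int) + 2) + 2 * ((t : Int) + 2))
      ((((t : Int) + 2) + 1) * (((t : Int) + 2) + 1)) (by omega) (by nlinarith)]
    rw [List.foldl_append]
    rw [runlem' _ (t + 1) _ _ _ _ _ (by push_cast; ring) (by omega) (by push_cast; omega)
      (fun i h1 h2 => hnsq i (by omega) (by omega))]
    -- last index: the square (s+1)^2 - 1 = s*s + 2*s, hit with current_step = 1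
    have hlast : ((((t : Int) + 2) + 1) * (((t : Int) + 2) + 1))
        = (((t : Int) + 2) * ((t : Int) + 2) + 2 * ((t : Int) + 2)) + 1 := by ring
    rw [hlast, PySem.List.pyRange_one_succ_right (by omega)]
    have hempty : PySem.List.pyRange
        (((t : Int) + 2) * ((t : Int) + 2) + 2 * ((t : Int) + 2))
        (((t : Int) + 2) * ((t : Int) + 2) + 2 * ((t : Int) + 2)) = ([] : List Int) := by
      simp
    rw [hempty, List.nil_append]
    have hctrue : (sqList (((t : Int) + 2) + 1)).contains
        (((t : Int) + 2) * ((t : Int) + 2) + 2 * ((t : Int) + 2)) = true :=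
      sqList_contains_true ((t : Int) + 2) h0
    rw [show ((t : Int) + 2 - ((t + 1 : Nat) : Int)) = 1 by push_cast; ring]
    simp only [List.foldl_cons, List.foldl_nil, swirlBody, hctrue, if_true]
    norm_num
    -- final list algebra
    refine ⟨?_, by ring⟩
    simp only [Q, List.append_assoc]
    push_cast
    rw [show (180 * ((t : Int) + 1) + 90 + 90) = 180 * ((t : Int) + 1) + 180 by ring]
    rw [show (180 * ((t : Int) + 1 + 1)) = 180 * ((t : Int) + 1) + 180 by ring]
    rw [List.replicate_succ' (n := t + 1) (a := 180 * ((t : Int) + 1)),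
        List.replicate_succ' (n := t + 1) (a := 180 * ((t : Int) + 1) + 180)]
    simp [List.append_assoc]

lemma sqList_last (s : Int) (h : 1 ≤ s) :
    PySem.List.pyGet? (sqList s) (-1) = some (s * s - 1) := by
  rw [show s = (s - 1) + 1 by ring, sqList_succ (s - 1) (by omega),
    pyGet?_append_singleton_neg_one]

-- ===== VERDICT (by name: the statement is the Claim_ definition above) =====
theorem generate_swirl_degrees_spec : Claim_equal_generate_swirl_degrees := by
  intro steps _ hpre
  unfold Pre_generate_swirl_degrees at hpre
  unfold Spec_generate_swirl_degrees
  rcases eq_or_lt_of_le hpre with h1 | h2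
  · rw [← h1]
    have hb : generate_swirl_degrees_alt 1 = [0] := by
      show swirlEmit (max 1 (1 * 1 - 1) : Int).toNat 0 0 0 [] = [0]
      norm_num
      rw [emit_run _ _ _ _ _ (by omega)]
      rw [swirlEmit]
      rfl
    rw [hb]
    decide
  · obtain ⟨t, ht⟩ : ∃ t : Nat, steps = (t : Int) + 2 := ⟨(steps - 2).toNat, by omega⟩
    subst ht
    simp only [generate_swirl_degrees]
    have hsq : ((PySem.List.pyRange 1 (((t : Int) + 2) + 1)).foldl
        (fun acc i => acc ++ [i * i - 1]) []) = sqList ((t : Int) + 2) := by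
      rw [PySem.List.foldl_append_singleton_eq_map]
      rfl
    rw [hsq, sqList_last _ (by omega)]
    show (List.foldl (swirlBody (sqList ((t : Int) + 2))) ([0], 0, 1, 0)
      (PySem.List.pyRange 2 (((t : Int) + 2) * ((t : Int) + 2) - 1 + 1))).1 = _
    rw [show ((t : Int) + 2) * ((t : Int) + 2) - 1 + 1 = ((t : Int) + 2) * ((t : Int) + 2) by ring]
    rw [AInv t, alt_closed t]
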